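-- pv_equiv track=rewrite | github.com/bensonlew/rnawl | src/mbio/packages/whole_transcriptome/assembly/step_code.py | count_step
-- ===== SOURCE A (Python) =====
-- def count_step(step, seq_len_list, y=10):
--     step_data = list()
--     step_dict = dict((step * i, int()) for i in range(1, y))
--     over_step = 0
--     for seq_len in seq_len_list:
--         for upper_limit in sorted(step_dict.keys()):
--             if seq_len <= upper_limit:
--                 step_dict[upper_limit] += 1
--                 break
--         else:
--             over_step += 1
--     else:
--         for upper_limit in sorted(step_dict.keys()):
--             step_data.append({'{}~{}'.format(upper_limit - step + 1, upper_limit): step_dict[upper_limit]})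
--         else:
--             step_data.append({'>{}'.format(step * (y - 1)): over_step})
--             step_data.append({'total': len(seq_len_list)})
--     return step_data
-- ===== SOURCE B (Python) =====
-- def count_step(step, seq_len_list, y=10):
--     # Sort once, then sweep the sorted lengths with a single advancing pointer
--     # across the strictly increasing bucket boundaries (two-pointer merge),
--     # instead of scanning the boundary list for every sequence length.
--     sorted_len = sorted(seq_len_list)
--     n = len(sorted_len)
--     bounds = sorted(set(step * i for i in range(1, y)))
--     step_data = []
--     i = 0
--     for b in bounds:
--         prev = i
--         while i < n and sorted_len[i] <= b:
--             i += 1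
--         step_data.append({'{}~{}'.format(b - step + 1, b): i - prev})
--     step_data.append({'>{}'.format(step * (y - 1)): n - i})
--     step_data.append({'total': n})
--     return step_data
-- ===== Notes on version B (the rewrite author's own statement) =====
-- stated objective: faster
-- what changed: B sorts the lengths once and sweeps them with a single advancing pointer over the increasing bucket boundaries (two-pointer sweep over sorted data), instead of rescanning the sorted boundary list for every sequence length.
import Mathlib
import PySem

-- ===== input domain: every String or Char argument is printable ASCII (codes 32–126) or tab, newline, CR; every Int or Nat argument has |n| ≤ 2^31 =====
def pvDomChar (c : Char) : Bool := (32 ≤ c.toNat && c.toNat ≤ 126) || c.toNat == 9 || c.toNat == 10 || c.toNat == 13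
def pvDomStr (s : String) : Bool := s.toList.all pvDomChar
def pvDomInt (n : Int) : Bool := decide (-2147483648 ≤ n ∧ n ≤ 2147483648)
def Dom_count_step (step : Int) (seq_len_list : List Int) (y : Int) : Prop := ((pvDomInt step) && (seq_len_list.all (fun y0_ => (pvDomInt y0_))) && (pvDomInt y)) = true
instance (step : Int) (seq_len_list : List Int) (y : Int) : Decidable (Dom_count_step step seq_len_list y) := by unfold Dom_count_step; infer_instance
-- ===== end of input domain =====

-- B sorts the lengths once and sweeps them with a single advancing pointer ov
-- the increasing bucket boundaries (two-pointer sweep) instead of rescanning the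
-- boundary list for every length; same return value, input list is not mutated.

-- ===== PORT A =====
-- inner 'for upper_limit in sorted(...): if seq_len <= upper_limit: ...; break (else: ov += 1)'
def countBump (ks : List Int) (x : Int) (d : PySem.Dict Int Int) (ov : Int) :
    PySem.Dict Int Int × Int :=
  match ks with
  | [] => (d, ov + 1)
  | k :: rest => if x ≤ k then (d.modify k 0 (· + 1), ov) else countBump rest x d ov

def count_step (step : Int) (seq_len_list : List Int) (y : Int) : List (List (String × Int)) :=
  -- step_dict = dict((step * i, int()) for i in range(1, y))
  let step_dict0 : PySem.Dict Int Int :=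
    ((PySem.List.pyRange 1 y 1).map (fun i => step * i)).foldl
      (fun d k => d.insert k 0) PySem.Dict.empty
  -- for seq_len in seq_len_list: …
  let st := seq_len_list.foldl
    (fun (st : PySem.Dict Int Int × Int) seq_len =>
      countBump (PySem.List.sorted st.1.keys (fun k => k)) seq_len st.1 st.2)
    (step_dict0, 0)
  -- for upper_limit in sorted(step_dict.keys()): step_data.append(…)
  let step_data :=
    (PySem.List.sorted st.1.keys (fun k => k)).map
      (fun u => [(PySem.Int.toStr (u - step + 1) ++ "~" ++ PySem.Int.toStr u, st.1.getD u 0)])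
  step_data ++ [[(">" ++ PySem.Int.toStr (step * (y - 1)), st.2)]]
            ++ [[("total", (seq_len_list.length : Int))]]

-- ===== PORT B =====
-- 'while i < n and sorted_len[i] <= b: i += 1'
def countAdvance (xs : List Int) (b : Int) (i : Nat) : Nat :=
  if h : i < xs.length then
    if xs.getD i 0 ≤ b then countAdvance xs b (i + 1) else i
  else i
termination_by xs.length - i

def count_step_alt (step : Int) (seq_len_list : List Int) (y : Int) : List (List (String × Int)) :=
  let sorted_len := PySem.List.sorted seq_len_list (fun x => x)
  let n := sorted_len.length
  let bounds := PySem.List.sorted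
    (PySem.Set.ofList ((PySem.List.pyRange 1 y 1).map (fun i => step * i))) (fun x => x)
  let st := bounds.foldl
    (fun (st : Nat × List (List (String × Int))) b =>
      let i := countAdvance sorted_len b st.1
      (i, st.2 ++ [[(PySem.Int.toStr (b - step + 1) ++ "~" ++ PySem.Int.toStr b,
                     (i : Int) - (st.1 : Int))]]))
    (0, [])
  st.2 ++ [[(">" ++ PySem.Int.toStr (step * (y - 1)), (n : Int) - (st.1 : Int))]]
       ++ [[("total", (n : Int))]]

-- ===== PRECONDITION & SPEC =====
def Spec_count_step (step : Int) (seq_len_list : List Int) (y : Int) (out : List (List (String × Int))) : Prop := out = count_step_alt step seq_len_list y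
instance (step : Int) (seq_len_list : List Int) (y : Int) (out : List (List (String × Int))) : Decidable (Spec_count_step step seq_len_list y out) := by unfold Spec_count_step; infer_instance

-- ===== CLAIM (what is proved, stated in full; the proofs are below) =====
def Claim_equal_count_step : Prop := ∀ (step : Int) (seq_len_list : List Int) (y : Int), Dom_count_step step seq_len_list y → Spec_count_step step seq_len_list y (count_step step seq_len_list y)

-- ===== LEMMAS AND PROOFS =====

/-- First boundary (scanned in order) that the value fits under. -/
def firstLE : List Int → Int → Option Int
  | [], _ => none
  | b :: bs, x => if x ≤ b then some b else firstLE bs x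

theorem firstLE_mem {ks : List Int} {x k : Int} (h : firstLE ks x = some k) : k ∈ ks := by
  induction ks with
  | nil => simp [firstLE] at h
  | cons b bs ih =>
    by_cases hx : x ≤ b
    · simp [firstLE, hx] at h; simp [h]
    · simp [firstLE, hx] at h
      exact List.mem_cons_of_mem _ (ih h)

theorem countBump_eq (ks : List Int) (x : Int) (d : PySem.Dict Int Int) (o : Int) :
    countBump ks x d o =
      match firstLE ks x with
      | none => (d, o + 1)
      | some k => (d.modify k 0 (· + 1), o) := by
  induction ks with
  | nil => simp [countBump, firstLE]
  | cons b bs ih =>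
    by_cases hx : x ≤ b <;> simp [countBump, firstLE, hx, ih]

/-- Reference bucketer: counts per boundary and the left-ov suffix, by
    repeatedly splitting the sorted list at each boundary. -/
def bkts : List Int → List Int → List Nat × List Int
  | [], xs => ([], xs)
  | b :: rest, xs =>
      let r := bkts rest (xs.dropWhile (fun a => a ≤ b))
      ((xs.takeWhile (fun a => a ≤ b)).length :: r.1, r.2)

theorem bkts_rem_length_le (bs : List Int) : ∀ xs : List Int, (bkts bs xs).2.length ≤ xs.length := by
  induction bs with
  | nil => intro xs; simp [bkts]
  | cons b rest ih =>
    intro xs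
    calc (bkts (b :: rest) xs).2.length = (bkts rest (xs.dropWhile (fun a => a ≤ b))).2.length := by
            simp [bkts]
      _ ≤ (xs.dropWhile (fun a => a ≤ b)).length := ih _
      _ ≤ xs.length := (List.dropWhile_sublist _).length_le

theorem takeWhile_length_eq_countP (b : Int) :
    ∀ xs : List Int, xs.Pairwise (· ≤ ·) →
      (xs.takeWhile (fun a => a ≤ b)).length = xs.countP (fun a => a ≤ b) := by
  intro xs
  induction xs with
  | nil => simp
  | cons a t ih =>
    intro hp
    rcases List.pairwise_cons.mp hp with ⟨ha, ht⟩
    by_cases hab : a ≤ b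
    · simp [hab, ih ht]
    · have : t.countP (fun a => decide (a ≤ b)) = 0 := by
        rw [List.countP_eq_zero]
        intro x hx
        simp only [decide_eq_true_eq]
        intro hxb; exact hab (le_trans (ha x hx) hxb)
      simp [hab, this]

theorem mem_dropWhile_gt (b : Int) :
    ∀ xs : List Int, xs.Pairwise (· ≤ ·) →
      ∀ x ∈ xs.dropWhile (fun a => a ≤ b), ¬ (x ≤ b) := by
  intro xs
  induction xs with
  | nil => simp
  | cons a t ih =>
    intro hp
    rcases List.pairwise_cons.mp hp with ⟨ha, ht⟩
    by_cases hab : a ≤ b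
    · simpa [List.dropWhile_cons, hab] using ih ht
    · intro x hx
      simp only [List.dropWhile_cons, hab, decide_false] at hx
      rcases List.mem_cons.mp hx with rfl | hx
      · exact hab
      · intro hxb; exact hab (le_trans (ha x hx) hxb)

/-- Core combinatorial fact: first-fit counting ov the whole list agrees with
    the split-at-successive-boundaries counting, for sorted inputs and strictly
    increasing boundaries. -/
theorem main_counts :
    ∀ bs : List Int, bs.Pairwise (· < ·) →
    ∀ xs : List Int, xs.Pairwise (· ≤ ·) →
      (bs.map (fun u => xs.countP (fun x => firstLE bs x == some u)) = (bkts bs xs).1)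
      ∧ xs.countP (fun x => firstLE bs x == none) = (bkts bs xs).2.length := by
  intro bs
  induction bs with
  | nil =>
    intro _ xs _
    constructor
    · simp [bkts]
    · simp [bkts, firstLE, List.countP_eq_length]
  | cons b rest ih =>
    intro hinc xs hxs
    rcases List.pairwise_cons.mp hinc with ⟨hb, hrest⟩
    set T := xs.takeWhile (fun a => a ≤ b) with hT
    set Dr := xs.dropWhile (fun a => a ≤ b) with hDr
    have hsplit : T ++ Dr = xs := List.takeWhile_append_dropWhile
    have hTmem : ∀ x ∈ T, x ≤ b := by
      intro x hx
      have := List.mem_takeWhile_imp hx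
      simpa using this
    have hDrmem : ∀ x ∈ Dr, ¬ (x ≤ b) := mem_dropWhile_gt b xs hxs
    have hDrsorted : Dr.Pairwise (· ≤ ·) := hxs.sublist (List.dropWhile_sublist _)
    have ihDr := ih hrest Dr hDrsorted
    constructor
    · rw [List.map_cons]
      have hhead : xs.countP (fun x => firstLE (b :: rest) x == some b)
          = xs.countP (fun a => a ≤ b) := by
        apply List.countP_congr
        intro x _
        by_cases hx : x ≤ b
        · simp [firstLE, hx]
        · cases hfl : firstLE rest x with
          | none => simp [firstLE, hx, hfl]
          | some k =>
            have hk : ¬ (k = b) := ne_of_gt (hb k (firstLE_mem hfl))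
            simp [firstLE, hx, hfl, hk]
      have htail : ∀ u ∈ rest,
          xs.countP (fun x => firstLE (b :: rest) x == some u)
            = Dr.countP (fun x => firstLE rest x == some u) := by
        intro u hu
        have hbu : b < u := hb u hu
        rw [← hsplit, List.countP_append]
        have h1 : T.countP (fun x => firstLE (b :: rest) x == some u) = 0 := by
          rw [List.countP_eq_zero]
          intro x hx
          have : x ≤ b := hTmem x hx
          simp [firstLE, this]
          omega
        have h2 : T.countP (fun x => firstLE (b :: rest) x == some u)
              + Dr.countP (fun x => firstLE (b :: rest) x == some u)
            = Dr.countP (fun x => firstLE rest x == some u) := by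
          rw [h1, Nat.zero_add]
          apply List.countP_congr
          intro x hx
          have : ¬ (x ≤ b) := hDrmem x hx
          simp [firstLE, this]
        rw [h2]
      calc (xs.countP (fun x => firstLE (b :: rest) x == some b))
            :: rest.map (fun u => xs.countP (fun x => firstLE (b :: rest) x == some u))
          = T.length :: rest.map (fun u => Dr.countP (fun x => firstLE rest x == some u)) := by
            rw [hhead, ← takeWhile_length_eq_countP b xs hxs, List.map_congr_left htail]
        _ = (bkts (b :: rest) xs).1 := by
            rw [ihDr.1]; simp [bkts, ← hT, ← hDr]
    · rw [← hsplit, List.countP_append]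
      have h1 : T.countP (fun x => firstLE (b :: rest) x == none) = 0 := by
        rw [List.countP_eq_zero]
        intro x hx
        simp [firstLE, hTmem x hx]
      have h2 : Dr.countP (fun x => firstLE (b :: rest) x == none)
          = Dr.countP (fun x => firstLE rest x == none) := by
        apply List.countP_congr
        intro x hx
        simp [firstLE, hDrmem x hx]
      rw [h1, h2, Nat.zero_add, ihDr.2, hsplit]
      simp [bkts, ← hDr]

-- ---- A side: the fold ov seq_len_list, characterised ----

theorem keys_countBump (ks : List Int) (x : Int) :
    ∀ (d : PySem.Dict Int Int) (o : Int), (∀ k ∈ ks, k ∈ d.keys) →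
      (countBump ks x d o).1.keys = d.keys := by
  intro d o hks
  rw [countBump_eq]
  cases hfl : firstLE ks x with
  | none => simp
  | some k =>
    have hk : k ∈ d.keys := hks k (firstLE_mem hfl)
    simp only
    rw [PySem.Dict.keys_modify, PySem.Dict.keys_insert_of_contains]
    exact (PySem.Dict.contains_iff_mem_keys d k).mpr hk

theorem getD_countBump (ks : List Int) (x : Int) (d : PySem.Dict Int Int) (o : Int) (u : Int) :
    (countBump ks x d o).1.getD u 0
      = d.getD u 0 + (if firstLE ks x == some u then 1 else 0) := by
  rw [countBump_eq]
  cases hfl : firstLE ks x with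
  | none => simp
  | some k =>
    simp only
    rw [PySem.Dict.getD_modify]
    by_cases hku : u = k
    · subst hku; simp
    · have h2 : ¬ (k = u) := fun h => hku h.symm
      simp [hku, h2]

theorem over_countBump (ks : List Int) (x : Int) (d : PySem.Dict Int Int) (o : Int) :
    (countBump ks x d o).2 = o + (if firstLE ks x == none then 1 else 0) := by
  rw [countBump_eq]
  cases hfl : firstLE ks x <;> simp

theorem afold_spec (ks : List Int) :
    ∀ (l : List Int) (d : PySem.Dict Int Int) (o : Int),
      PySem.List.sorted d.keys (fun k => k) = ks →
      (let r := l.foldl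
        (fun (st : PySem.Dict Int Int × Int) x =>
          countBump (PySem.List.sorted st.1.keys (fun k => k)) x st.1 st.2) (d, o)
       r.1.keys = d.keys
       ∧ (∀ u, r.1.getD u 0 = d.getD u 0 + (l.countP (fun x => firstLE ks x == some u) : Int))
       ∧ r.2 = o + (l.countP (fun x => firstLE ks x == none) : Int)) := by
  intro l
  induction l with
  | nil =>
    intro d o _
    exact ⟨rfl, by intro u; simp, by simp⟩
  | cons x t ih =>
    intro d o hks
    simp only [List.foldl_cons, hks]
    have hmem : ∀ k ∈ ks, k ∈ d.keys := by
      intro k hk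
      rw [← hks] at hk
      exact (PySem.List.mem_sorted d.keys (fun k => k) false k).mp hk
    have hkeys : (countBump ks x d o).1.keys = d.keys := keys_countBump ks x d o hmem
    obtain ⟨h1, h2, h3⟩ := ih (countBump ks x d o).1 (countBump ks x d o).2 (by rw [hkeys, hks])
    refine ⟨by rw [h1, hkeys], ?_, ?_⟩
    · intro u
      rw [h2 u, getD_countBump, List.countP_cons]
      by_cases hp : (firstLE ks x == some u) = true <;> simp [hp] <;> push_cast <;> ring
    · rw [h3, over_countBump, List.countP_cons]
      by_cases hp : (firstLE ks x == none) = true <;> simp [hp] <;> push_cast <;> ring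

-- ---- B side: the while loop and the fold ov bounds, characterised ----

theorem drop_takeWhile_length {α : Type} (p : α → Bool) :
    ∀ l : List α, l.drop (l.takeWhile p).length = l.dropWhile p := by
  intro l
  induction l with
  | nil => simp
  | cons a t ih =>
    by_cases hp : p a <;> simp [List.takeWhile_cons, List.dropWhile_cons, hp, ih]

theorem countAdvance_eq (xs : List Int) (b : Int) :
    ∀ i : Nat, countAdvance xs b i = i + ((xs.drop i).takeWhile (fun a => a ≤ b)).length := by
  intro i
  fun_induction countAdvance xs b i with
  | case1 i h hle ih =>
    rw [ih, List.drop_eq_getElem_cons h, List.takeWhile_cons]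
    rw [List.getD_eq_getElem xs 0 h] at hle
    simp [hle]
    omega
  | case2 i h hle =>
    rw [List.drop_eq_getElem_cons h, List.takeWhile_cons]
    rw [List.getD_eq_getElem xs 0 h] at hle
    simp [hle]
  | case3 i h =>
    rw [List.drop_eq_nil_of_le (by omega)]
    simp

theorem bfold_spec (step : Int) (xs : List Int) :
    ∀ (bs : List Int) (i : Nat) (acc : List (List (String × Int))),
      bs.foldl
        (fun (st : Nat × List (List (String × Int))) b =>
          let j := countAdvance xs b st.1
          (j, st.2 ++ [[(PySem.Int.toStr (b - step + 1) ++ "~" ++ PySem.Int.toStr b,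
                         (j : Int) - (st.1 : Int))]]))
        (i, acc)
      = (i + ((xs.drop i).length - (bkts bs (xs.drop i)).2.length),
         acc ++ List.zipWith
           (fun b (c : Nat) => [(PySem.Int.toStr (b - step + 1) ++ "~" ++ PySem.Int.toStr b, (c : Int))])
           bs (bkts bs (xs.drop i)).1) := by
  intro bs
  induction bs with
  | nil => intro i acc; simp [bkts]
  | cons b rest ih =>
    intro i acc
    simp only [List.foldl_cons]
    rw [countAdvance_eq xs b i]
    set t := ((xs.drop i).takeWhile (fun a => a ≤ b)).length with ht
    have hdrop : xs.drop (i + t) = (xs.drop i).dropWhile (fun a => a ≤ b) := by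
      rw [← drop_takeWhile_length (fun a => decide (a ≤ b)) (xs.drop i), List.drop_drop, ← ht,
        Nat.add_comm]
    rw [ih (i + t) _]
    have hb : bkts (b :: rest) (xs.drop i)
        = ((t :: (bkts rest ((xs.drop i).dropWhile (fun a => a ≤ b))).1),
           (bkts rest ((xs.drop i).dropWhile (fun a => a ≤ b))).2) := by
      simp [bkts, ht]
    rw [hb, hdrop]
    set Dr := (xs.drop i).dropWhile (fun a => a ≤ b) with hDr
    have hlen : (xs.drop i).length = t + Dr.length := by
      rw [ht, hDr, ← List.length_append, List.takeWhile_append_dropWhile]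
    have hle : (bkts rest Dr).2.length ≤ Dr.length := bkts_rem_length_le rest Dr
    rw [Prod.mk.injEq]
    constructor
    · dsimp only
      omega
    · rw [List.zipWith_cons_cons, List.append_assoc]
      congr 2
      simp

theorem zipWith_map_self {α β γ : Type} (f : α → β → γ) (g : α → β) (l : List α) :
    List.zipWith f l (l.map g) = l.map (fun x => f x (g x)) := by
  induction l with
  | nil => rfl
  | cons a t ih => simp [ih]

theorem getD_foldl_insert_zero :
    ∀ (L : List Int) (d : PySem.Dict Int Int) (u : Int), d.getD u 0 = 0 →
      (L.foldl (fun d k => d.insert k 0) d).getD u 0 = 0 := by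
  intro L
  induction L with
  | nil => intro d u h; simpa
  | cons a t ih =>
    intro d u h
    simp only [List.foldl_cons]
    apply ih
    rw [PySem.Dict.getD_insert]
    split_ifs <;> [rfl; exact h]

-- ===== VERDICT (by name: the statement is the Claim_ definition above) =====
theorem count_step_spec : Claim_equal_count_step := by
  intro step l y _
  unfold Spec_count_step count_step count_step_alt
  dsimp only
  set mapped := (PySem.List.pyRange 1 y 1).map (fun i => step * i) with hm
  set d0 : PySem.Dict Int Int := mapped.foldl (fun d k => d.insert k 0) PySem.Dict.empty with hd0
  set ks := PySem.List.sorted (PySem.Set.ofList mapped) (fun k => k) with hksdef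
  set xs := PySem.List.sorted l (fun x => x) with hxsdef
  have hd0keys : d0.keys = PySem.Set.ofList mapped := by
    rw [hd0, show (fun (d : PySem.Dict Int Int) (k : Int) => d.insert k 0)
          = (fun (d : PySem.Dict Int Int) (x : Int) =>
              d.insert x ((fun (_ : PySem.Dict Int Int) (_ : Int) => (0 : Int)) d x)) from rfl,
        PySem.Dict.keys_foldl_insert]
    simp [PySem.Dict.keys_empty, PySem.Set.update, PySem.Set.ofList_eq_foldl]
  have hsortkeys : PySem.List.sorted d0.keys (fun k => k) = ks := by rw [hd0keys, hksdef]
  have hinc : ks.Pairwise (· < ·) := by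
    rw [hksdef]; exact PySem.List.sorted_ofList_pairwise_lt mapped
  have hxs : xs.Pairwise (· ≤ ·) := PySem.List.sorted_pairwise l _
  obtain ⟨hA1, hA2, hA3⟩ := afold_spec ks l d0 0 hsortkeys
  obtain ⟨hM1, hM2⟩ := main_counts ks hinc xs hxs
  have hperm : ∀ p : Int → Bool, l.countP p = xs.countP p :=
    fun p => ((PySem.List.sorted_perm l (fun x => x) false).countP_eq p).symm
  have hbf := bfold_spec step xs ks 0 []
  rw [List.drop_zero] at hbf
  set stA := l.foldl
      (fun (st : PySem.Dict Int Int × Int) x =>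
        countBump (PySem.List.sorted st.1.keys (fun k => k)) x st.1 st.2) (d0, 0) with hstA
  rw [hbf, hA1, hsortkeys]
  dsimp only
  have hle : (bkts ks xs).2.length ≤ xs.length := bkts_rem_length_le ks xs
  have hd0getD : ∀ u, d0.getD u 0 = 0 := fun u => by
    rw [hd0]
    exact getD_foldl_insert_zero mapped PySem.Dict.empty u (by rw [PySem.Dict.getD_empty])
  have hheads :
      ks.map (fun u =>
          [(PySem.Int.toStr (u - step + 1) ++ "~" ++ PySem.Int.toStr u, stA.1.getD u 0)])
        = List.zipWith
            (fun b (c : Nat) =>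
              [(PySem.Int.toStr (b - step + 1) ++ "~" ++ PySem.Int.toStr b, (c : Int))])
            ks (bkts ks xs).1 := by
    rw [← hM1, zipWith_map_self]
    apply List.map_congr_left
    intro u _
    rw [hA2 u, hperm (fun x => firstLE ks x == some u)]
    simp [hd0getD u]
  have hover : stA.2 = (xs.length : Int) - ((0 + (xs.length - (bkts ks xs).2.length) : Nat) : Int) := by
    rw [hA3, hperm (fun x => firstLE ks x == none), hM2]
    omega
  have htot : (l.length : Int) = (xs.length : Int) := by
    rw [hxsdef, PySem.List.length_sorted]
  rw [hheads, hover, htot]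
  simp
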